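-- pv_equiv track=rewrite | github.com/gschen/where2go-python-test | 1906101038江来洪/day20191126/周赛164_02.py | jiang
-- ===== SOURCE A (Python) =====
-- def jiang(grid):
--     def jiang1(y):
--         list = []
--         for l in grid:
--             list.append(l[y])
--         return list
--     num = 0
--     for o in grid:
--         for p in o:
--             if p == 1:
--                 num += 1
--     a = len(grid)
--     b = len(grid[0])
--     c = a * b
--     x, y, s = 0, 0, 0
--     for i in range(c):
--         if grid[x][y] == 1:
--             if sum(grid[x]) == 1 and sum(jiang1(y)) == 1:
--                 s += 1
--         if y == b - 1:
--             x += 1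
--             y = 0
--         else:
--             y += 1
--     return num - s
-- ===== SOURCE B (Python) =====
-- def jiang(grid):
--     b = len(grid[0])
--     num = sum(row.count(1) for row in grid)
--     ones = [row for row in grid if sum(row) == 1]
--     s = 0
--     if ones:
--         colsums = [sum(col) for col in zip(*grid)]
--         for row in ones:
--             for y in range(b):
--                 if row[y] == 1 and colsums[y] == 1:
--                     s += 1
--     return num - s
-- ===== Notes on version B (the rewrite author's own statement) =====
-- stated objective: faster
-- what changed: B counts 1s with row.count, sums each row once keeping only the rows whose sum is 1, and computes all column sums once via zip(*grid) only when such a row exists, instead of A's row-major index walk that rebuilds and re-sums a whole column (and re-sums the row) at every 1-cell.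
import Mathlib
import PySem

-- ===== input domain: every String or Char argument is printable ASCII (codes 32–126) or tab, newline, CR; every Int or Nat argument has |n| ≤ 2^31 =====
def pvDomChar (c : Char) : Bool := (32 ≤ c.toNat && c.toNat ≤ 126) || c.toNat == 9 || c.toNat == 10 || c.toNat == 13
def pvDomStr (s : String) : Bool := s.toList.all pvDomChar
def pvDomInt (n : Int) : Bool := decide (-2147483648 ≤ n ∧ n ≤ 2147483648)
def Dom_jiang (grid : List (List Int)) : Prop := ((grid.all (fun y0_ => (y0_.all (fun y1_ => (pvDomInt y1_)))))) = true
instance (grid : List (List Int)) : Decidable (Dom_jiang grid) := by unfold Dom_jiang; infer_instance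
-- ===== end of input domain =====

-- B counts 1s per row, sums each row once and keeps only rows summing to 1, and computes all
-- column sums once (only if such a row exists), instead of A's row-major index walk that
-- rebuilds and re-sums a whole column (and re-sums the row) at every 1-cell; objective: faster.

-- ===== PORT A =====
-- A's inner helper jiang1(y): builds the y-th column by appending l[y] for each row
def jiang1 (grid : List (List Int)) (y : Int) : List Int :=
  grid.foldl (fun acc l => acc ++ [(PySem.List.pyGet? l y).getD 0]) []

-- one iteration of A's 'for i in range(c)' loop body over the state (x, y, s)
def jiangStep (grid : List (List Int)) (b : Int) (st : Int × Int × Int) : Int × Int × Int :=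
  let s := if (PySem.List.pyGet? ((PySem.List.pyGet? grid st.1).getD []) st.2.1).getD 0 == 1 then
             (if ((PySem.List.pyGet? grid st.1).getD []).sum == 1 && (jiang1 grid st.2.1).sum == 1
              then st.2.2 + 1 else st.2.2)
           else st.2.2
  if st.2.1 == b - 1 then (st.1 + 1, 0, s) else (st.1, st.2.1 + 1, s)

def jiang (grid : List (List Int)) : Int :=
  let num := grid.foldl (fun n o => o.foldl (fun n p => if p == 1 then n + 1 else n) n) 0
  let a : Int := grid.length
  let b : Int := (((PySem.List.pyGet? grid 0).getD []).length : Int)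
  let c := a * b
  let fin := (PySem.List.pyRange 0 c).foldl (fun st _ => jiangStep grid b st) (0, 0, 0)
  num - fin.2.2

-- ===== PORT B =====
-- port of Python's zip(*rows): for each k below the minimum row length, the list of k-th
-- elements of the rows (exact: k < every row's length, so getD's default is never used)
def pyZipStar (rows : List (List Int)) : List (List Int) :=
  match rows with
  | [] => []
  | r :: rs =>
      (List.range (rs.foldl (fun m row => min m row.length) r.length)).map
        (fun k => (r :: rs).map (fun row => row.getD k 0))

def jiang_alt (grid : List (List Int)) : Int :=
  let b : Int := (((PySem.List.pyGet? grid 0).getD []).length : Int)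
  let num := grid.foldl (fun n row => n + (PySem.List.count row 1 : Int)) 0
  let ones := grid.filter (fun row => row.sum == 1)
  let s : Int :=
    if ones.isEmpty then 0
    else
      let colsums : List Int := (pyZipStar grid).map (fun col => col.sum)
      ones.foldl (fun s row =>
        (PySem.List.pyRange 0 b).foldl (fun s y =>
          if ((PySem.List.pyGet? row y).getD 0 == 1
              && (PySem.List.pyGet? colsums y).getD 0 == 1)
          then s + 1 else s) s) 0
  num - s

-- ===== PRECONDITION & SPEC =====
-- Pre_ excludes exactly the inputs where A raises IndexError: the empty grid (grid[0])
-- and grids with a row shorter than the first row (l[y] / grid[x][y] out of range).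
def Pre_jiang (grid : List (List Int)) : Prop :=
  grid ≠ [] ∧ ∀ row ∈ grid, (grid.headD []).length ≤ row.length
instance (grid : List (List Int)) : Decidable (Pre_jiang grid) := by unfold Pre_jiang; infer_instance

def pvWitness_jiang : List (List Int) := [[1, 0], [0, 1]]

def Spec_jiang (grid : List (List Int)) (out : Int) : Prop := out = jiang_alt grid
instance (grid : List (List Int)) (out : Int) : Decidable (Spec_jiang grid out) := by unfold Spec_jiang; infer_instance

-- ===== CLAIM (what is proved, stated in full; the proofs are below) =====
def Claim_equal_jiang : Prop := ∀ (grid : List (List Int)), Dom_jiang grid → Pre_jiang grid → Spec_jiang grid (jiang grid)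

-- ===== LEMMAS AND PROOFS =====

-- the condition A tests at cell (x, y)
def jiangP (grid : List (List Int)) (x y : Int) : Bool :=
  ((PySem.List.pyGet? ((PySem.List.pyGet? grid x).getD []) y).getD 0 == 1)
  && (((PySem.List.pyGet? grid x).getD []).sum == 1 && (jiang1 grid y).sum == 1)

-- count of special cells in row x among columns [j, j+k)
def rowCnt (grid : List (List Int)) (x : Int) (j k : Nat) : Int :=
  ((List.range' j k).map (fun (y : Nat) => if jiangP grid x (y : Int) then (1 : Int) else 0)).sum

-- count of special cells in rows [x, x+m), all bN columns
def gridCnt (grid : List (List Int)) (x : Int) (m bN : Nat) : Int :=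
  ((List.range m).map (fun (i : Nat) => rowCnt grid (x + (i : Int)) 0 bN)).sum

lemma jiangStep_eq (grid : List (List Int)) (b : Int) (st : Int × Int × Int) :
    jiangStep grid b st =
      (if st.2.1 == b - 1
       then (st.1 + 1, 0, st.2.2 + (if jiangP grid st.1 st.2.1 then 1 else 0))
       else (st.1, st.2.1 + 1, st.2.2 + (if jiangP grid st.1 st.2.1 then 1 else 0))) := by
  unfold jiangStep jiangP
  cases h1 : ((PySem.List.pyGet? ((PySem.List.pyGet? grid st.1).getD []) st.2.1).getD 0 == 1) <;>
  cases h2 : (((PySem.List.pyGet? grid st.1).getD []).sum == 1 && (jiang1 grid st.2.1).sum == 1) <;>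
  simp

lemma foldl_const_iterate {α β : Type} (l : List α) (f : β → β) (init : β) :
    l.foldl (fun st _ => f st) init = f^[l.length] init := by
  induction l generalizing init with
  | nil => rfl
  | cons x t ih => simp [List.foldl_cons, ih, Function.iterate_succ_apply]

lemma jiang_rowLoop (grid : List (List Int)) (bN : Nat) :
    ∀ k, 1 ≤ k → k ≤ bN → ∀ (x s : Int),
      (jiangStep grid (bN : Int))^[k] (x, ((bN - k : Nat) : Int), s)
        = (x + 1, 0, s + rowCnt grid x (bN - k) k) := by
  intro k
  induction k with
  | zero => omega
  | succ k ih =>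
    intro _ hkb x s
    rw [Function.iterate_succ_apply, jiangStep_eq]
    by_cases hk : k = 0
    · subst hk
      have hy : (((bN - 1 : Nat) : Int) == (bN : Int) - 1) = true := by
        simp; omega
      simp only [hy, if_pos]
      simp [rowCnt, List.range'_succ]
    · have hy : (((bN - (k+1) : Nat) : Int) == (bN : Int) - 1) = false := by
        simp; omega
      simp only [hy, Bool.false_eq_true, if_false]
      have hcast : ((bN - (k+1) : Nat) : Int) + 1 = ((bN - k : Nat) : Int) := by omega
      rw [hcast, ih (by omega) (by omega)]
      have hr : rowCnt grid x (bN - (k+1)) (k+1)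
          = (if jiangP grid x ((bN - (k+1) : Nat) : Int) then 1 else 0) + rowCnt grid x (bN - k) k := by
        have h1 : bN - (k+1) + 1 = bN - k := by omega
        simp [rowCnt, List.range'_succ, h1]
      rw [hr, add_assoc]

lemma gridCnt_succ (grid : List (List Int)) (x : Int) (m bN : Nat) :
    gridCnt grid x (m + 1) bN = rowCnt grid x 0 bN + gridCnt grid (x + 1) m bN := by
  unfold gridCnt
  rw [List.range_succ_eq_map, List.map_cons, List.sum_cons, List.map_map]
  congr 1
  · norm_num
  · apply congrArg List.sum
    apply List.map_congr_left
    intro i _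
    simp only [Function.comp_apply]
    congr 1
    push_cast
    ring

lemma jiang_allLoop (grid : List (List Int)) (bN : Nat) (hb : 1 ≤ bN) :
    ∀ m (x s : Int),
      (jiangStep grid (bN : Int))^[m * bN] (x, 0, s) = (x + m, 0, s + gridCnt grid x m bN) := by
  intro m
  induction m with
  | zero => intro x s; simp [gridCnt]
  | succ m ih =>
    intro x s
    have hmul : (m + 1) * bN = m * bN + bN := by ring
    rw [hmul, Function.iterate_add_apply]
    have hrow := jiang_rowLoop grid bN bN hb le_rfl x s
    simp only [Nat.sub_self, Nat.cast_zero] at hrow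
    rw [hrow, ih (x + 1), gridCnt_succ]
    simp only [Prod.mk.injEq]
    refine ⟨by push_cast; ring, trivial, by ring⟩

-- A's s-loop computes the total special-cell count
lemma jiang_sA (grid : List (List Int)) (bN : Nat) :
    ((PySem.List.pyRange 0 ((grid.length : Int) * (bN : Int))).foldl
        (fun st _ => jiangStep grid (bN : Int) st) ((0 : Int), (0 : Int), (0 : Int))).2.2
      = gridCnt grid 0 grid.length bN := by
  rw [foldl_const_iterate, PySem.List.length_pyRange_one]
  have hc : ((grid.length : Int) * (bN : Int) - 0) = ((grid.length * bN : Nat) : Int) := by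
    push_cast; ring
  rw [hc, Int.toNat_natCast]
  by_cases hb : bN = 0
  · subst hb
    simp [gridCnt, rowCnt]
  · rw [jiang_allLoop grid bN (by omega) grid.length 0 0]
    simp

-- A's num fold equals B's num fold
lemma jiang_num_eq (grid : List (List Int)) :
    grid.foldl (fun n o => o.foldl (fun n p => if p == 1 then n + 1 else n) n) 0
      = grid.foldl (fun n row => n + (PySem.List.count row 1 : Int)) 0 := by
  apply PySem.List.foldl_congr_mem
  intro n row _
  rw [PySem.List.foldl_count_if (fun p => p == 1) row n]
  simp [PySem.List.count_eq, List.count]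

-- jiang1 builds the y-th column as a map over the rows
lemma jiang1_eq_map (grid : List (List Int)) (y : Int) :
    jiang1 grid y = grid.map (fun l => (PySem.List.pyGet? l y).getD 0) := by
  unfold jiang1
  rw [PySem.List.foldl_append_singleton_eq_map]
  simp

-- the fold computing the minimum row length is bounded below by a common lower bound
lemma le_foldl_min_len (bN : Nat) (rs : List (List Int)) :
    ∀ acc : Nat, bN ≤ acc → (∀ row ∈ rs, bN ≤ row.length) →
      bN ≤ rs.foldl (fun m row => min m row.length) acc := by
  induction rs with
  | nil => intro acc hacc _; exact hacc
  | cons r t ih =>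
    intro acc hacc hall
    exact ih _ (le_min hacc (hall r (by simp))) (fun row hr => hall row (by simp [hr]))

-- indexing the transposed grid at an in-range column
lemma pyZipStar_getElem? (grid : List (List Int)) (hne : grid ≠ []) (bN j : Nat)
    (hj : j < bN) (hrows : ∀ row ∈ grid, bN ≤ row.length) :
    (pyZipStar grid)[j]? = some (grid.map (fun row => row.getD j 0)) := by
  cases grid with
  | nil => exact absurd rfl hne
  | cons r rs =>
    have hM : bN ≤ rs.foldl (fun m row => min m row.length) r.length :=
      le_foldl_min_len bN rs r.length (hrows r (by simp)) (fun row hr => hrows row (by simp [hr]))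
    unfold pyZipStar
    rw [List.getElem?_map, List.getElem?_range (by omega)]
    rfl

-- the colsums entry at column j is the sum A computes with jiang1
lemma jiang_colsum_eq (grid : List (List Int)) (hne : grid ≠ []) (bN j : Nat)
    (hj : j < bN) (hrows : ∀ row ∈ grid, bN ≤ row.length) :
    PySem.List.pyGet? ((pyZipStar grid).map (fun col => col.sum)) (j : Int)
      = some ((grid.map (fun l => (PySem.List.pyGet? l (j : Int)).getD 0)).sum) := by
  rw [PySem.List.pyGet?_natCast, List.getElem?_map,
      pyZipStar_getElem? grid hne bN j hj hrows]
  simp only [Option.map_some]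
  congr 2
  apply List.map_congr_left
  intro l _
  rw [PySem.List.pyGet?_natCast, List.getD_eq_getElem?_getD]

-- B's cell condition coincides with A's at in-range coordinates of a row summing to 1
lemma jiang_cond_eq (grid : List (List Int)) (hne : grid ≠ []) (bN : Nat)
    (hrows : ∀ row ∈ grid, bN ≤ row.length) (i j : Nat)
    (hi : i < grid.length) (hj : j < bN) (hr : (grid[i].sum == 1) = true) :
    ((PySem.List.pyGet? grid[i] (j : Int)).getD 0 == 1
      && (PySem.List.pyGet? ((pyZipStar grid).map (fun col => col.sum)) (j : Int)).getD 0 == 1)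
      = jiangP grid (i : Int) (j : Int) := by
  have hgi : PySem.List.pyGet? grid (i : Int) = some grid[i] := by
    rw [PySem.List.pyGet?_natCast]
    exact List.getElem?_eq_getElem hi
  unfold jiangP
  rw [hgi, jiang1_eq_map, jiang_colsum_eq grid hne bN j hj hrows]
  simp only [Option.getD_some]
  rw [hr, Bool.true_and]

-- A's condition is false everywhere on a row not summing to 1
lemma jiangP_false (grid : List (List Int)) (i : Nat) (y : Int)
    (hi : i < grid.length) (hr : (grid[i].sum == 1) = false) :
    jiangP grid (i : Int) y = false := by
  have hgi : PySem.List.pyGet? grid (i : Int) = some grid[i] := by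
    rw [PySem.List.pyGet?_natCast]
    exact List.getElem?_eq_getElem hi
  unfold jiangP
  rw [hgi]
  simp [hr]

-- sum over a filtered list as a guarded sum over the whole list
lemma sum_map_filter_eq (l : List (List Int)) (p : List Int → Bool) (f : List Int → Int) :
    ((l.filter p).map f).sum = (l.map (fun x => if p x then f x else 0)).sum := by
  induction l with
  | nil => rfl
  | cons x t ih => by_cases h : p x <;> simp [h, ih]

-- the guarded per-row counts add up to the total special-cell count
set_option maxHeartbeats 2000000 in
lemma jiang_sB_core (grid : List (List Int)) (bN : Nat) (hne : grid ≠ [])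
    (hrows : ∀ row ∈ grid, bN ≤ row.length) :
    (grid.map (fun row => if row.sum == 1 then
          (List.countP (fun y =>
            ((PySem.List.pyGet? row y).getD 0 == 1
              && (PySem.List.pyGet? ((pyZipStar grid).map (fun col => col.sum)) y).getD 0 == 1))
            (PySem.List.pyRange 0 (bN : Int)) : Int) else 0)).sum
      = gridCnt grid 0 grid.length bN := by
  unfold gridCnt
  apply congrArg List.sum
  apply List.ext_getElem (by simp)
  intro i hi₁ hi₂
  have hi : i < grid.length := by simpa using hi₁
  simp only [List.getElem_map, List.getElem_range, zero_add]
  unfold rowCnt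
  rw [← List.range_eq_range', PySem.List.sum_map_ite_one_zero]
  cases hr : (grid[i].sum == 1) with
  | false =>
    simp only [Bool.false_eq_true, if_false]
    symm
    norm_cast
    apply List.countP_eq_zero.mpr
    intro y _
    simp [jiangP_false grid i (y : Int) hi hr]
  | true =>
    simp only [if_true]
    congr 1
    have hmap : List.countP (fun (y : Nat) => jiangP grid (i : Int) (y : Int)) (List.range bN)
        = List.countP (fun (y : Int) => jiangP grid (i : Int) y) (PySem.List.pyRange 0 (bN : Int)) := by
      rw [PySem.List.pyRange_zero_nat, List.countP_map]
      rfl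
    rw [hmap]
    apply List.countP_congr
    intro y hy
    have hy' := (PySem.List.mem_pyRange_one).mp hy
    obtain ⟨j, rfl⟩ : ∃ j : Nat, (j : Int) = y := ⟨y.toNat, by omega⟩
    have hjlt : j < bN := by exact_mod_cast hy'.2
    rw [jiang_cond_eq grid hne bN hrows i j hi hjlt hr]

-- B's s computation (lazy colsums, only rows summing to 1) equals the total special-cell count
set_option maxHeartbeats 2000000 in
lemma jiang_sB (grid : List (List Int)) (bN : Nat) (hne : grid ≠ [])
    (hrows : ∀ row ∈ grid, bN ≤ row.length) :
    (if (grid.filter (fun row => row.sum == 1)).isEmpty then (0 : Int)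
     else (grid.filter (fun row => row.sum == 1)).foldl (fun s row =>
        (PySem.List.pyRange 0 (bN : Int)).foldl (fun s y =>
          if ((PySem.List.pyGet? row y).getD 0 == 1
              && (PySem.List.pyGet? ((pyZipStar grid).map (fun col => col.sum)) y).getD 0 == 1)
          then s + 1 else s) s) 0)
      = gridCnt grid 0 grid.length bN := by
  have hcore := jiang_sB_core grid bN hne hrows
  cases hE : (grid.filter (fun row => row.sum == 1)).isEmpty with
  | true =>
    simp only [if_true]
    rw [← hcore]
    symm
    have hnone : ∀ row ∈ grid, ¬ ((fun row => row.sum == 1) row = true) := by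
      simpa [List.filter_eq_nil_iff] using (List.isEmpty_iff.mp hE)
    rw [List.map_congr_left (fun row hrow => if_neg (hnone row hrow))]
    simp
  | false =>
    simp only [Bool.false_eq_true, if_false]
    have h1 : ∀ (s : Int) (row : List Int), row ∈ grid.filter (fun row => row.sum == 1) →
        (PySem.List.pyRange 0 (bN : Int)).foldl (fun s y =>
          if ((PySem.List.pyGet? row y).getD 0 == 1
              && (PySem.List.pyGet? ((pyZipStar grid).map (fun col => col.sum)) y).getD 0 == 1)
          then s + 1 else s) s
        = s + (List.countP (fun y =>
            ((PySem.List.pyGet? row y).getD 0 == 1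
              && (PySem.List.pyGet? ((pyZipStar grid).map (fun col => col.sum)) y).getD 0 == 1))
            (PySem.List.pyRange 0 (bN : Int)) : Int) := by
      intro s row _
      exact PySem.List.foldl_count_if _ _ s
    refine Eq.trans (PySem.List.foldl_congr_mem _ _ _ _ h1) ?_
    rw [PySem.List.foldl_add, zero_add, sum_map_filter_eq]
    exact hcore

-- ===== VERDICT (by name: the statement is the Claim_ definition above) =====
theorem jiang_spec : Claim_equal_jiang := by
  intro grid _ hpre
  obtain ⟨hne, hrows⟩ := hpre
  have hg0 : PySem.List.pyGet? grid 0 = some (grid.headD []) := by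
    cases grid with
    | nil => exact absurd rfl hne
    | cons h t => simp [PySem.List.pyGet?, PySem.List.pyIdx?]
  unfold Spec_jiang jiang jiang_alt
  dsimp only
  rw [hg0]
  simp only [Option.getD_some]
  rw [jiang_num_eq, jiang_sA grid (grid.headD []).length]
  congr 1
  exact (jiang_sB grid (grid.headD []).length hne hrows).symm
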